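-- pv_equiv track=rewrite | github.com/AsherFoster/AOC-2022 | day-5/part_one.py | consume_map
-- ===== SOURCE A (Python) =====
-- from typing import Iterable, List
--
-- Map = List[List[str]]
--
-- def consume_map(lines: Iterable[str]) -> Map:
--     stacks = []
--
--     for line in lines:
--         if line.startswith(" 1 "):  # Map key marker
--             return [list(reversed(stack)) for stack in stacks]
--
--         # Ensure we have enough stacks in our map
--         while len(stacks) < (len(line) + 1) // 4:
--             stacks.append([])
--
--         for stack in range(0, len(line), 4):
--             crate = line[stack + 1:stack + 2]
--             if crate != ' ':
--                 stacks[stack // 4].append(crate)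
--
--     raise Exception()
-- ===== SOURCE B (Python) =====
-- from typing import Iterable, List
--
-- Map = List[List[str]]
--
-- def consume_map(lines: Iterable[str]) -> Map:
--     # Collect the map lines first, then build the stacks column-major,
--     # reading each column bottom-to-top (no grow-as-you-go, no reversal).
--     buffer = []
--     for line in lines:
--         if line.startswith(" 1 "):  # Map key marker
--             break
--         buffer.append(line)
--     else:
--         raise Exception()
--     max_cols = max(((len(l) + 1) // 4 for l in buffer), default=0)
--     return [
--         [l[4 * c + 1]
--          for l in reversed(buffer)
--          if 4 * c + 1 < len(l) and l[4 * c + 1] != ' ']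
--         for c in range(max_cols)
--     ]
-- ===== Notes on version B (the rewrite author's own statement) =====
-- stated objective: alternative
-- what changed: Instead of streaming lines into stacks that are grown on the fly, appended to row-by-row and finally each reversed, B buffers the map lines until the ' 1 ' marker, computes the column count once, and builds the result column-major by scanning the buffered rows bottom-to-top, so no per-stack reversal or stack-growing loop exists.
-- outside the precondition, e.g. on consume_map(['[A]', 'x', ' 1 ']): A returns [['', 'A']], B returns [['A']]; on consume_map(['a!', ' 1 ']): A raises IndexError, B returns []
import Mathlib
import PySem

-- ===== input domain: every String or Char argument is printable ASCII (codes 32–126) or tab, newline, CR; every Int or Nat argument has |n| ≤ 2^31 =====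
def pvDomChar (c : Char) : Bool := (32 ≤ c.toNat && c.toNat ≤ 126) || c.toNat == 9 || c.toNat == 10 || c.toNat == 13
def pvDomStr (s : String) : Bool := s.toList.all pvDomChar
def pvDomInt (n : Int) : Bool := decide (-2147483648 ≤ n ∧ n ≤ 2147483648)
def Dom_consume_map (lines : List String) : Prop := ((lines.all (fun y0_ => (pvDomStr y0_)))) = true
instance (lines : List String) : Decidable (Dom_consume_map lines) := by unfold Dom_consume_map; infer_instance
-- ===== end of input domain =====

-- B buffers the map lines up to the ' 1 ' marker and builds the stacks column-major bottom-to-top,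
-- instead of A's grow-as-you-go row streaming with a final per-stack reversal.

-- ===== PORT A =====
def pvIsMarker (l : String) : Bool := PySem.Str.startswith l " 1 "

-- one iteration of A's outer `for` body on a non-marker line:
-- the `while` grows the stacks, then the inner `for` appends the crates of this row
def consume_map_line (cs : List Char) (sts : List (List String)) : List (List String) :=
  let sts := sts ++ List.replicate (((cs.length + 1) / 4) - sts.length) ([] : List String)
  (PySem.List.pyRange 0 (cs.length : Int) 4).foldl
    (fun st s =>
      let crate := PySem.List.slice cs (some (s + 1)) (some (s + 2))
      if crate ≠ [' '] then
        -- sts[stack // 4].append(crate); Python raises IndexError when stack // 4 is out of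
        -- range (those inputs are excluded by Pre_); List.modify is a no-op there
        st.modify (PySem.Int.floordiv s 4).toNat (fun stk => stk ++ [String.ofList crate])
      else st)
    sts

def consume_map_go : List String → List (List String) → List (List String)
  | [], _ => []          -- Python: raise Exception() (excluded by Pre_)
  | l :: rest, sts =>
    if pvIsMarker l then sts.map List.reverse
    else consume_map_go rest (consume_map_line l.toList sts)

def consume_map (lines : List String) : List (List String) := consume_map_go lines []

-- ===== PORT B =====
-- lines strictly before the first marker; none = no marker (Python: raise Exception(), excluded by Pre_)
def pvBuffer? : List String → Option (List String)
  | [] => none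
  | l :: rest => if pvIsMarker l then some [] else (pvBuffer? rest).map (l :: ·)

-- `l[4*c+1] if 4*c+1 < len(l) and l[4*c+1] != ' '` of B's per-column comprehension
def pvPick (c : Nat) (cs : List Char) : Option String :=
  match cs[4 * c + 1]? with
  | some ch => if ch ≠ ' ' then some (String.ofList [ch]) else none
  | none => none

def consume_map_alt (lines : List String) : List (List String) :=
  match pvBuffer? lines with
  | none => []          -- Python: raise Exception() (excluded by Pre_)
  | some buffer =>
    let maxCols := buffer.foldl (fun m l => max m ((l.toList.length + 1) / 4)) 0
    (List.range maxCols).map (fun c => buffer.reverse.filterMap (fun l => pvPick c l.toList))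

-- ===== PRECONDITION & SPEC =====
-- Pre_ excludes inputs with no ' 1 ' marker line (A raises Exception) and inputs with a malformed
-- map line before the marker (length ≡ 1 mod 4, or ≡ 2 mod 4 not ending in a space): on such lines
-- A raises IndexError or appends a spurious crate, depending on the widths of neighbouring lines —
-- an artefact of its grow-and-append implementation.
def pvOkLine (l : String) : Bool :=
  l.toList.length % 4 ≠ 1 && (l.toList.length % 4 ≠ 2 || l.toList.getLast? == some ' ')

def Pre_consume_map (lines : List String) : Prop :=
  lines.any pvIsMarker = true ∧
  ∀ l ∈ lines.takeWhile (fun l => !pvIsMarker l), pvOkLine l = true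

instance (lines : List String) : Decidable (Pre_consume_map lines) := by
  unfold Pre_consume_map; infer_instance

def pvWitness_consume_map : List String := ["    [D]", "[A] [C]", " 1   2 "]

def Spec_consume_map (lines : List String) (out : List (List String)) : Prop := out = consume_map_alt lines
instance (lines : List String) (out : List (List String)) : Decidable (Spec_consume_map lines out) := by unfold Spec_consume_map; infer_instance

-- ===== CLAIM (what is proved, stated in full; the proofs are below) =====
def Claim_equal_consume_map : Prop := ∀ (lines : List String), Dom_consume_map lines → Pre_consume_map lines → Spec_consume_map lines (consume_map lines)

-- ===== LEMMAS AND PROOFS =====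

theorem pv_ok_iff (l : String) : pvOkLine l = true ↔
    l.toList.length % 4 ≠ 1 ∧ (l.toList.length % 4 = 2 → l.toList.getLast? = some ' ') := by
  simp [pvOkLine, Decidable.imp_iff_not_or]

theorem pv_last (cs : List Char) (i : Nat) (h1 : i < cs.length) (h2 : i = cs.length - 1)
    (hl : cs.getLast? = some ' ') : cs[i] = ' ' := by
  have hq : cs[i]? = some ' ' := by rw [h2, ← List.getLast?_eq_getElem?]; exact hl
  rw [List.getElem?_eq_getElem h1] at hq
  exact Option.some_inj.mp hq

theorem pv_pick_none (l : String) (hok : pvOkLine l = true) (c : Nat)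
    (hc : (l.toList.length + 1) / 4 ≤ c) : pvPick c l.toList = none := by
  obtain ⟨hA, hB⟩ := (pv_ok_iff l).mp hok
  by_cases h1 : 4 * c + 1 < l.toList.length
  · have hn2 : l.toList.length % 4 = 2 ∧ 4 * c + 1 = l.toList.length - 1 := by omega
    have := pv_last l.toList (4 * c + 1) h1 hn2.2 (hB hn2.1)
    simp [pvPick, List.getElem?_eq_getElem h1, this]
  · have hge : l.toList.length ≤ 4 * c + 1 := by omega
    simp [pvPick, List.getElem?_eq_none hge]


theorem pv_pyRange_four (n : Nat) :
    PySem.List.pyRange 0 (n : Int) 4 = (List.range ((n + 3) / 4)).map (fun c : Nat => ((4 * c : Nat) : Int)) := by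
  rw [PySem.List.pyRange_of_pos 0 n (by norm_num)]
  have h4 : (((n : Int) - 0 + 4 - 1) / 4).toNat = (n + 3) / 4 := by
    omega
  rcases Nat.eq_zero_or_pos n with h | h
  · subst h; simp
  · rw [if_pos (by exact_mod_cast h), h4]
    simp

theorem pv_ext_stacks (m K : Nat) (g : Nat → List String) :
    (List.range m).map g ++ List.replicate (K - m) ([] : List String)
      = (List.range (max m K)).map (fun c => if c < m then g c else []) := by
  apply List.ext_getElem
  · simp; omega
  · intro i h1 h2
    rw [List.getElem_append]
    split
    · next h =>
      simp only [List.length_map, List.length_range] at h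
      simp only [List.getElem_map, List.getElem_range]
      rw [if_pos h]
    · next h =>
      simp only [List.length_map, List.length_range] at h
      simp only [List.getElem_replicate, List.getElem_map, List.getElem_range]
      rw [if_neg (by omega)]

-- modify on a range-map
theorem pv_modify_map (M j : Nat) (f : Nat → List String) (h : List String → List String) :
    ((List.range M).map f).modify j h
      = (List.range M).map (fun c => if c = j then h (f c) else f c) := by
  apply List.ext_getElem
  · simp
  · intro i h1 h2
    simp only [List.length_modify] at h1
    rw [List.getElem_modify]
    simp only [List.getElem_map, List.getElem_range]
    rcases eq_or_ne i j with rfl | hne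
    · simp
    · simp [hne, hne.symm]

theorem pv_inner (cs : List Char) (hA : cs.length % 4 ≠ 1)
    (hB : cs.length % 4 = 2 → cs.getLast? = some ' ')
    (M : Nat) (hMK : (cs.length + 1) / 4 ≤ M) (g0 : Nat → List String) :
    ∀ j, j ≤ (cs.length + 3) / 4 →
    ((List.range j).map (fun c : Nat => ((4 * c : Nat) : Int))).foldl
      (fun st s =>
        let crate := PySem.List.slice cs (some (s + 1)) (some (s + 2))
        if crate ≠ [' '] then
          st.modify (PySem.Int.floordiv s 4).toNat (fun stk => stk ++ [String.ofList crate])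
        else st)
      ((List.range M).map g0)
      = (List.range M).map (fun c => g0 c ++ if c < j then (pvPick c cs).toList else []) := by
  intro j hj
  induction j with
  | zero => simp
  | succ j ih =>
    rw [List.range_succ, List.map_append, List.foldl_append, ih (by omega)]
    simp only [List.map_cons, List.map_nil, List.foldl_cons, List.foldl_nil]
    have h4j : 4 * j < cs.length := by omega
    have hs1 : ((4 * j : Nat) : Int) + 1 = ((4 * j + 1 : Nat) : Int) := by push_cast; ring
    have hs2 : ((4 * j : Nat) : Int) + 2 = ((4 * j + 2 : Nat) : Int) := by push_cast; ring
    rw [hs1, hs2, PySem.List.slice_natCast]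
    have hdiv : (PySem.Int.floordiv ((4 * j : Nat) : Int) 4).toNat = j := by
      rw [show (4 : Int) = ((4 : Nat) : Int) by norm_num, PySem.Int.floordiv_natCast]
      simp
    by_cases h1 : 4 * j + 1 < cs.length
    · have hdrop : (cs.drop (4 * j + 1)).take (4 * j + 2 - (4 * j + 1)) = [cs[4 * j + 1]] := by
        rw [show 4 * j + 2 - (4 * j + 1) = 1 by omega, List.drop_eq_getElem_cons h1,
          List.take_cons (by omega), List.take_zero]
      rw [hdrop, hdiv]
      have hpick : pvPick j cs
          = if cs[4 * j + 1] ≠ ' ' then some (String.ofList [cs[4 * j + 1]]) else none := by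
        simp [pvPick, List.getElem?_eq_getElem h1]
      by_cases hch : cs[4 * j + 1] = ' '
      · rw [if_neg (by simp [hch])]
        apply List.map_congr_left
        intro c hc
        rcases Nat.lt_trichotomy c j with h | h | h
        · simp [h, Nat.lt_succ_of_lt h]
        · subst h
          simp [hpick, hch]
        · rw [if_neg (by omega), if_neg (by omega)]
      · have hjM : j < M := by
          by_contra hge
          have hK : (cs.length + 1) / 4 ≤ j := le_trans hMK (by omega)
          have hn2 : cs.length % 4 = 2 := by omega
          have hlast : cs.getLast? = some ' ' := hB hn2
          have hidx : 4 * j + 1 = cs.length - 1 := by omega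
          apply hch
          have hq : cs[4 * j + 1]? = some ' ' := by
            rw [hidx, ← List.getLast?_eq_getElem?]
            exact hlast
          rw [List.getElem?_eq_getElem h1] at hq
          exact Option.some_inj.mp hq
        rw [if_pos (by simp [hch]), pv_modify_map]
        apply List.map_congr_left
        intro c hc
        rcases Nat.lt_trichotomy c j with h | h | h
        · rw [if_neg (by omega), if_pos h, if_pos (by omega)]
        · subst h
          rw [if_pos rfl, if_neg (Nat.lt_irrefl _), if_pos (Nat.lt_succ_self _)]
          simp [hpick, hch]
        · rw [if_neg (by omega), if_neg (by omega), if_neg (by omega)]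
    · exfalso
      omega



theorem pv_line_closed (l : String) (hok : pvOkLine l = true) (m : Nat) (g : Nat → List String) :
    consume_map_line l.toList ((List.range m).map g)
      = (List.range (max m ((l.toList.length + 1) / 4))).map
          (fun c => (if c < m then g c else []) ++ (pvPick c l.toList).toList) := by
  obtain ⟨hA, hB⟩ := (pv_ok_iff l).mp hok
  unfold consume_map_line
  rw [List.length_map, List.length_range, pv_ext_stacks m ((l.toList.length + 1) / 4) g,
    pv_pyRange_four l.toList.length,
    pv_inner l.toList hA hB (max m ((l.toList.length + 1) / 4)) (le_max_right _ _)
      (fun c => if c < m then g c else []) ((l.toList.length + 3) / 4) (le_refl _)]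
  apply List.map_congr_left
  intro c hc
  by_cases h : c < (l.toList.length + 3) / 4
  · rw [if_pos h]
  · rw [if_neg h, pv_pick_none l hok c (by omega)]
    rfl

theorem pv_fold_max (buffer : List String) (a : Nat) :
    buffer.foldl (fun m l => max m ((l.toList.length + 1) / 4)) a
      = max a (buffer.foldl (fun m l => max m ((l.toList.length + 1) / 4)) 0) := by
  induction buffer generalizing a with
  | nil => simp
  | cons l t ih =>
    simp only [List.foldl_cons]
    rw [ih (max a _), ih (max 0 _), Nat.zero_max, Nat.max_assoc]

theorem pv_fold_closed (buffer : List String) (hok : ∀ l ∈ buffer, pvOkLine l = true)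
    (m : Nat) (g : Nat → List String) :
    buffer.foldl (fun st l => consume_map_line l.toList st) ((List.range m).map g)
      = (List.range (max m (buffer.foldl (fun a l => max a ((l.toList.length + 1) / 4)) 0))).map
          (fun c => (if c < m then g c else []) ++ buffer.filterMap (fun l => pvPick c l.toList)) := by
  induction buffer generalizing m g with
  | nil =>
    simp only [List.foldl_nil, List.filterMap_nil, List.append_nil, Nat.max_zero]
    apply List.map_congr_left
    intro c hc
    rw [if_pos (List.mem_range.mp hc)]
  | cons l t ih =>
    simp only [List.foldl_cons]
    rw [pv_line_closed l (hok l (List.mem_cons_self)) m g,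
      ih (fun x hx => hok x (List.mem_cons_of_mem _ hx)),
      pv_fold_max t (max 0 ((l.toList.length + 1) / 4)), Nat.zero_max, Nat.max_assoc]
    apply List.map_congr_left
    intro c hc
    rw [List.filterMap_cons]
    by_cases h : c < max m ((l.toList.length + 1) / 4)
    · rw [if_pos h]
      cases hp : pvPick c l.toList <;> simp [List.append_assoc]
    · rw [if_neg h, if_neg (by omega),
        pv_pick_none l (hok l (List.mem_cons_self)) c (by omega)]

theorem pv_go_eq (lines : List String) (sts : List (List String))
    (h : lines.any pvIsMarker = true) :
    consume_map_go lines sts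
      = ((lines.takeWhile (fun l => !pvIsMarker l)).foldl
          (fun st l => consume_map_line l.toList st) sts).map List.reverse := by
  induction lines generalizing sts with
  | nil => simp at h
  | cons l t ih =>
    by_cases hm : pvIsMarker l = true
    · simp [consume_map_go, hm]
    · simp only [List.any_cons, hm, Bool.false_or] at h
      simp [consume_map_go, hm, ih _ h]

theorem pv_buffer_eq (lines : List String) (h : lines.any pvIsMarker = true) :
    pvBuffer? lines = some (lines.takeWhile (fun l => !pvIsMarker l)) := by
  induction lines with
  | nil => simp at h
  | cons l t ih =>
    by_cases hm : pvIsMarker l = true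
    · simp [pvBuffer?, hm]
    · simp only [List.any_cons, hm, Bool.false_or] at h
      simp [pvBuffer?, hm, ih h]

-- ===== VERDICT (by name: the statement is the Claim_ definition above) =====
theorem consume_map_spec : Claim_equal_consume_map := by
  intro lines _hdom hpre
  obtain ⟨hmark, hok⟩ := hpre
  unfold Spec_consume_map consume_map consume_map_alt
  rw [pv_buffer_eq lines hmark, pv_go_eq lines [] hmark]
  have h0 : ([] : List (List String)) = (List.range 0).map (fun _ => ([] : List String)) := rfl
  rw [h0, pv_fold_closed (lines.takeWhile (fun l => !pvIsMarker l)) hok 0 (fun _ => [])]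
  simp [List.map_map, Function.comp, List.filterMap_reverse]
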